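-- pv_equiv track=rewrite | github.com/Sophiarong/CCL2022-MCLTC-kk | train.py | compareEdits
-- ===== SOURCE A (Python) =====
-- def compareEdits(hyp_edits, ref_edits):
--     tp = 0  # True Positives
--     fp = 0  # False Positives
--     fn = 0  # False Negatives
--     cat_dict = {}  # {cat: [tp, fp, fn], ...}
--
--     for h_edit, h_cats in hyp_edits.items():
--         # noop hyp edits cannot be TP or FP
--         if h_cats[0] == "noop":
--             continue
--         # TRUE POSITIVES
--         if h_edit in ref_edits.keys():
--             # On occasion, multiple tokens at same span.
--             for h_cat in ref_edits[h_edit]:  # Use ref dict for TP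
--                 tp += 1
--                 # Each dict value [TP, FP, FN]
--                 if h_cat in cat_dict.keys():
--                     cat_dict[h_cat][0] += 1
--                 else:
--                     cat_dict[h_cat] = [1, 0, 0]
--         # FALSE POSITIVES
--         else:
--             # On occasion, multiple tokens at same span.
--             for h_cat in h_cats:
--                 fp += 1
--                 # Each dict value [TP, FP, FN]
--                 if h_cat in cat_dict.keys():
--                     cat_dict[h_cat][1] += 1
--                 else:
--                     cat_dict[h_cat] = [0, 1, 0]
--     for r_edit, r_cats in ref_edits.items():
--         # noop ref edits cannot be FN
--         if r_cats[0] == "noop":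
--             continue
--         # FALSE NEGATIVES
--         if r_edit not in hyp_edits.keys():
--             # On occasion, multiple tokens at same span.
--             for r_cat in r_cats:
--                 fn += 1
--                 # Each dict value [TP, FP, FN]
--                 if r_cat in cat_dict.keys():
--                     cat_dict[r_cat][2] += 1
--                 else:
--                     cat_dict[r_cat] = [0, 0, 1]
--     return tp, fp, fn, cat_dict
-- ===== SOURCE B (Python) =====
-- def compareEdits(hyp_edits, ref_edits):
--     # Build a flat event stream (category, column) with column 0=TP, 1=FP, 2=FN.
--     events = []
--     for h_edit, h_cats in hyp_edits.items():
--         if h_cats[0] == "noop":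
--             continue
--         if h_edit in ref_edits:
--             events.extend((c, 0) for c in ref_edits[h_edit])
--         else:
--             events.extend((c, 1) for c in h_cats)
--     for r_edit, r_cats in ref_edits.items():
--         if r_cats[0] != "noop" and r_edit not in hyp_edits:
--             events.extend((c, 2) for c in r_cats)
--     # Fold the events into the per-category table.
--     cat_dict = {}
--     for c, k in events:
--         row = cat_dict.setdefault(c, [0, 0, 0])
--         row[k] += 1
--     # The three scalars are column sums of the table.
--     tp = sum(v[0] for v in cat_dict.values())
--     fp = sum(v[1] for v in cat_dict.values())
--     fn = sum(v[2] for v in cat_dict.values())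
--     return tp, fp, fn, cat_dict
-- ===== Notes on version B (the rewrite author's own statement) =====
-- stated objective: alternative
-- what changed: B replaces A's inline tp/fp/fn running counters with a three-phase decomposition: it first flattens both loops into a single (category, column) event stream, then folds the events once into the per-category table, and finally recovers tp/fp/fn as column sums over the table's values.
import Mathlib
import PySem

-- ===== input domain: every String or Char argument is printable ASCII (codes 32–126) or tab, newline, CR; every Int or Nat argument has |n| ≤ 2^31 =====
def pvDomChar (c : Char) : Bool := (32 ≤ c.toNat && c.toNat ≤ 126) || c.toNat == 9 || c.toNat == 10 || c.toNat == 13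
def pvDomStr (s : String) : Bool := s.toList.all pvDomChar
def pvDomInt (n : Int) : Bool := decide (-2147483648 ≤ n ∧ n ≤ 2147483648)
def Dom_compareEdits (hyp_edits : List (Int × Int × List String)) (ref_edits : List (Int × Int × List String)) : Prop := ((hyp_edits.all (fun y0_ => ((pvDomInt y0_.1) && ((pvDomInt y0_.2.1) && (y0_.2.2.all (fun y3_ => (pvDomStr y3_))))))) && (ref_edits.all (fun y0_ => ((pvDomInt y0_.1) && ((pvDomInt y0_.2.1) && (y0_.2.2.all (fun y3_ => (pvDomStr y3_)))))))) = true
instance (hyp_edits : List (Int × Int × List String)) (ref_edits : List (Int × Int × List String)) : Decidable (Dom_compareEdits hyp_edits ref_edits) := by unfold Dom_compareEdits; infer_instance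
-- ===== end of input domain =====

-- B builds a flat (category, column) event stream, folds it into the per-category
-- table once, and recovers tp/fp/fn as column sums of the table, instead of A's
-- inline running counters; objective: alternative decomposition, same cost.

-- ===== PORT A =====
-- dict key lookup: the dicts are association lists keyed by the (Int × Int) span; first match
def lookupEdit (d : List (Int × Int × List String)) (k : Int × Int) : Option (List String) :=
  (d.find? (fun p => p.1 == k.1 && p.2.1 == k.2)).map (fun p => p.2.2)

-- row[k] += 1 on a 3-element list (exact for the in-range indices the programs use)
def incAt (xs : List Int) (k : Nat) : List Int := xs.set k (xs.getD k 0 + 1)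

-- A's "if h_cat in cat_dict: cat_dict[h_cat][k] += 1 else: cat_dict[h_cat] = fresh"
def catAdd (d : List (String × List Int)) (c : String) (k : Nat) (fresh : List Int) :
    List (String × List Int) :=
  if d.any (fun p => p.1 == c) then
    d.map (fun p => if p.1 == c then (p.1, incAt p.2 k) else p)
  else d ++ [(c, fresh)]

def compareEdits (hyp_edits : List (Int × Int × List String)) (ref_edits : List (Int × Int × List String)) : Int × Int × Int × (List (String × List Int)) :=
  let s1 := hyp_edits.foldl (fun s e =>
    match PySem.List.pyGet? e.2.2 0 with
    | none => s              -- Python raises IndexError on an empty category list; excluded by Pre_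
    | some c0 =>
      if c0 = "noop" then s
      else
        match lookupEdit ref_edits (e.1, e.2.1) with
        | some rcats =>      -- TRUE POSITIVES (use ref dict)
          rcats.foldl (fun s c => (s.1 + 1, s.2.1, s.2.2.1, catAdd s.2.2.2 c 0 [1, 0, 0])) s
        | none =>            -- FALSE POSITIVES
          e.2.2.foldl (fun s c => (s.1, s.2.1 + 1, s.2.2.1, catAdd s.2.2.2 c 1 [0, 1, 0])) s)
    ((0 : Int), (0 : Int), (0 : Int), ([] : List (String × List Int)))
  ref_edits.foldl (fun s e =>
    match PySem.List.pyGet? e.2.2 0 with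
    | none => s              -- Python raises IndexError; excluded by Pre_
    | some c0 =>
      if c0 = "noop" then s
      else
        match lookupEdit hyp_edits (e.1, e.2.1) with
        | some _ => s
        | none =>            -- FALSE NEGATIVES
          e.2.2.foldl (fun s c => (s.1, s.2.1, s.2.2.1 + 1, catAdd s.2.2.2 c 2 [0, 0, 1])) s) s1

-- ===== PORT B =====
-- events contributed by one hyp entry: (cat, 0) = TP, (cat, 1) = FP
def hypEvents (ref_edits : List (Int × Int × List String)) (e : Int × Int × List String) :
    List (String × Nat) :=
  match PySem.List.pyGet? e.2.2 0 with
  | none => []               -- Python raises IndexError; excluded by Pre_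
  | some c0 =>
    if c0 = "noop" then []
    else
      match lookupEdit ref_edits (e.1, e.2.1) with
      | some rcats => rcats.map (fun c => (c, 0))
      | none => e.2.2.map (fun c => (c, 1))

-- events contributed by one ref entry: (cat, 2) = FN
def refEvents (hyp_edits : List (Int × Int × List String)) (e : Int × Int × List String) :
    List (String × Nat) :=
  match PySem.List.pyGet? e.2.2 0 with
  | none => []               -- Python raises IndexError; excluded by Pre_
  | some c0 =>
    if c0 ≠ "noop" ∧ lookupEdit hyp_edits (e.1, e.2.1) = none then e.2.2.map (fun c => (c, 2))
    else []

-- "row = cat_dict.setdefault(c, [0,0,0]); row[k] += 1"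
def bumpB (d : List (String × List Int)) (c : String) (k : Nat) : List (String × List Int) :=
  let d' := if d.any (fun p => p.1 == c) then d else d ++ [(c, [0, 0, 0])]
  d'.map (fun p => if p.1 == c then (p.1, incAt p.2 k) else p)

-- sum(v[k] for v in cat_dict.values())
def colSum (d : List (String × List Int)) (k : Int) : Int :=
  (d.map (fun p => (PySem.List.pyGet? p.2 k).getD 0)).sum

def compareEdits_alt (hyp_edits : List (Int × Int × List String)) (ref_edits : List (Int × Int × List String)) : Int × Int × Int × (List (String × List Int)) :=
  let ev1 := hyp_edits.foldl (fun ev e => ev ++ hypEvents ref_edits e) []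
  let events := ref_edits.foldl (fun ev e => ev ++ refEvents hyp_edits e) ev1
  let cat_dict := events.foldl (fun d e => bumpB d e.1 e.2) []
  (colSum cat_dict 0, colSum cat_dict 1, colSum cat_dict 2, cat_dict)

-- ===== PRECONDITION & SPEC =====
-- Pre_ excludes entries whose category list is empty (A raises IndexError on h_cats[0]/r_cats[0])
-- and association lists with a duplicated (span) key, which do not represent a Python dict.
def Pre_compareEdits (hyp_edits : List (Int × Int × List String)) (ref_edits : List (Int × Int × List String)) : Prop :=
  (hyp_edits.map (fun p => (p.1, p.2.1))).Nodup ∧ (ref_edits.map (fun p => (p.1, p.2.1))).Nodup ∧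
  (∀ p ∈ hyp_edits, p.2.2 ≠ []) ∧ (∀ p ∈ ref_edits, p.2.2 ≠ [])
instance (hyp_edits : List (Int × Int × List String)) (ref_edits : List (Int × Int × List String)) : Decidable (Pre_compareEdits hyp_edits ref_edits) := by unfold Pre_compareEdits; infer_instance

def pvWitness_compareEdits : (List (Int × Int × List String)) × (List (Int × Int × List String)) :=
  ([(0, 1, ["M:DET"]), (2, 3, ["R:VERB"])], [(0, 1, ["M:DET", "U:PREP"])])

def Spec_compareEdits (hyp_edits : List (Int × Int × List String)) (ref_edits : List (Int × Int × List String)) (out : Int × Int × Int × (List (String × List Int))) : Prop := out = compareEdits_alt hyp_edits ref_edits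
instance (hyp_edits : List (Int × Int × List String)) (ref_edits : List (Int × Int × List String)) (out : Int × Int × Int × (List (String × List Int))) : Decidable (Spec_compareEdits hyp_edits ref_edits out) := by unfold Spec_compareEdits; infer_instance

-- ===== CLAIM (what is proved, stated in full; the proofs are below) =====
def Claim_equal_compareEdits : Prop := ∀ (hyp_edits : List (Int × Int × List String)) (ref_edits : List (Int × Int × List String)), Dom_compareEdits hyp_edits ref_edits → Pre_compareEdits hyp_edits ref_edits → Spec_compareEdits hyp_edits ref_edits (compareEdits hyp_edits ref_edits)

-- ===== LEMMAS AND PROOFS =====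

-- one event applied to A's running state: bump the matching counter and the table
def applyEv (s : Int × Int × Int × List (String × List Int)) (e : String × Nat) :
    Int × Int × Int × List (String × List Int) :=
  ((if e.2 = 0 then s.1 + 1 else s.1),
   (if e.2 = 1 then s.2.1 + 1 else s.2.1),
   (if e.2 = 2 then s.2.2.1 + 1 else s.2.2.1),
   bumpB s.2.2.2 e.1 e.2)

lemma map_noKey (d : List (String × List Int)) (c : String)
    (g : String × List Int → String × List Int)
    (h : ∀ p ∈ d, (p.1 == c) = false) :
    d.map (fun p => if p.1 == c then g p else p) = d := by
  induction d with
  | nil => rfl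
  | cons p d ih =>
    simp only [List.map_cons, h p (by simp)]
    rw [ih (fun q hq => h q (by simp [hq]))]
    simp

lemma bumpB_eq (d : List (String × List Int)) (c : String) (k : Nat) :
    bumpB d c k =
      if d.any (fun p => p.1 == c) then
        d.map (fun p => if p.1 == c then (p.1, incAt p.2 k) else p)
      else d ++ [(c, incAt [0, 0, 0] k)] := by
  unfold bumpB
  by_cases h : d.any (fun p => p.1 == c) = true
  · simp [h]
  · have hno : ∀ p ∈ d, (p.1 == c) = false := by
      intro p hp
      by_contra hc
      exact h (List.any_eq_true.2 ⟨p, hp, by simpa using hc⟩)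
    simp only [h, if_false, Bool.false_eq_true, List.map_append]
    rw [map_noKey d c _ hno]
    simp [incAt]

lemma catAdd0 (d : List (String × List Int)) (c : String) :
    catAdd d c 0 [1, 0, 0] = bumpB d c 0 := by
  rw [bumpB_eq, catAdd]; norm_num [incAt]

lemma catAdd1 (d : List (String × List Int)) (c : String) :
    catAdd d c 1 [0, 1, 0] = bumpB d c 1 := by
  rw [bumpB_eq, catAdd]; norm_num [incAt]

lemma catAdd2 (d : List (String × List Int)) (c : String) :
    catAdd d c 2 [0, 0, 1] = bumpB d c 2 := by
  rw [bumpB_eq, catAdd]; norm_num [incAt]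

-- A's three inner category loops are event folds
lemma inner_fold_eq (cs : List String) (k : Nat) (hk : k < 3)
    (s : Int × Int × Int × List (String × List Int)) :
    (cs.map (fun c => (c, k))).foldl applyEv s =
      cs.foldl (fun s c =>
        ((if k = 0 then s.1 + 1 else s.1),
         (if k = 1 then s.2.1 + 1 else s.2.1),
         (if k = 2 then s.2.2.1 + 1 else s.2.2.1),
         bumpB s.2.2.2 c k)) s := by
  induction cs generalizing s with
  | nil => rfl
  | cons c cs ih => simp [applyEv, ih]

-- A's whole computation is the event fold over the concatenated event stream
lemma compareEdits_eq_eventFold (hyp ref : List (Int × Int × List String)) :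
    compareEdits hyp ref =
      ((hyp.flatMap (hypEvents ref)) ++ (ref.flatMap (refEvents hyp))).foldl applyEv
        (0, 0, 0, []) := by
  rw [List.foldl_append]
  unfold compareEdits
  have step1 : ∀ (l : List (Int × Int × List String)) s,
      l.foldl (fun s e =>
        match PySem.List.pyGet? e.2.2 0 with
        | none => s
        | some c0 =>
          if c0 = "noop" then s
          else
            match lookupEdit ref (e.1, e.2.1) with
            | some rcats =>
              rcats.foldl (fun s c => (s.1 + 1, s.2.1, s.2.2.1, catAdd s.2.2.2 c 0 [1, 0, 0])) s
            | none =>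
              e.2.2.foldl (fun s c => (s.1, s.2.1 + 1, s.2.2.1, catAdd s.2.2.2 c 1 [0, 1, 0])) s) s
      = (l.flatMap (hypEvents ref)).foldl applyEv s := by
    intro l
    induction l with
    | nil => intro s; rfl
    | cons e l ih =>
      intro s
      simp only [List.foldl_cons, List.flatMap_cons, List.foldl_append, ih]
      congr 1
      unfold hypEvents
      cases hg : PySem.List.pyGet? e.2.2 0 with
      | none => rfl
      | some c0 =>
        by_cases hn : c0 = "noop"
        · simp [hn]
        · simp only [hn, if_false]
          cases hl : lookupEdit ref (e.1, e.2.1) with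
          | some rcats =>
            rw [inner_fold_eq rcats 0 (by omega)]
            simp only [catAdd0]
            norm_num
          | none =>
            rw [inner_fold_eq e.2.2 1 (by omega)]
            simp only [catAdd1]
            norm_num
  have step2 : ∀ (l : List (Int × Int × List String)) s,
      l.foldl (fun s e =>
        match PySem.List.pyGet? e.2.2 0 with
        | none => s
        | some c0 =>
          if c0 = "noop" then s
          else
            match lookupEdit hyp (e.1, e.2.1) with
            | some _ => s
            | none =>
              e.2.2.foldl (fun s c => (s.1, s.2.1, s.2.2.1 + 1, catAdd s.2.2.2 c 2 [0, 0, 1])) s) s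
      = (l.flatMap (refEvents hyp)).foldl applyEv s := by
    intro l
    induction l with
    | nil => intro s; rfl
    | cons e l ih =>
      intro s
      simp only [List.foldl_cons, List.flatMap_cons, List.foldl_append, ih]
      congr 1
      unfold refEvents
      cases hg : PySem.List.pyGet? e.2.2 0 with
      | none => rfl
      | some c0 =>
        by_cases hn : c0 = "noop"
        · simp [hn]
        · cases hl : lookupEdit hyp (e.1, e.2.1) with
          | some rcats => simp [hn]
          | none =>
            simp only [hn, ne_eq, not_false_eq_true, true_and, if_true]
            rw [inner_fold_eq e.2.2 2 (by omega)]
            simp only [catAdd2]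
            norm_num
  rw [step1, step2]

-- every value in the table is a 3-row
def Inv3 (d : List (String × List Int)) : Prop := ∀ p ∈ d, ∃ x y z : Int, p.2 = [x, y, z]

def bstep (d : List (String × List Int)) (e : String × Nat) : List (String × List Int) :=
  bumpB d e.1 e.2

lemma bumpB_cons_ne (p : String × List Int) (d : List (String × List Int)) (c : String)
    (k : Nat) (h : (p.1 == c) = false) : bumpB (p :: d) c k = p :: bumpB d c k := by
  unfold bumpB
  simp only [List.any_cons, h, Bool.false_or]
  by_cases ha : d.any (fun q => q.1 == c) = true <;>
    simp [ha, h] <;>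
    (try (intro hc; exfalso; rw [hc] at h; simp at h))

lemma bumpB_cons_self (p : String × List Int) (d : List (String × List Int)) (c : String)
    (k : Nat) (h : (p.1 == c) = true) (hnd : ∀ q ∈ d, (q.1 == c) = false) :
    bumpB (p :: d) c k = (p.1, incAt p.2 k) :: d := by
  unfold bumpB
  simp only [List.any_cons, h, Bool.true_or, if_true, List.map_cons, h]
  rw [map_noKey d c _ hnd]

lemma keys_bumpB (d : List (String × List Int)) (c : String) (k : Nat) :
    (bumpB d c k).map Prod.fst =
      if d.any (fun p => p.1 == c) then d.map Prod.fst else d.map Prod.fst ++ [c] := by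
  unfold bumpB
  by_cases h : d.any (fun p => p.1 == c) = true <;>
    simp [h, List.map_map] <;>
    (try (intro a b _; by_cases hac : a = c <;> simp [hac, incAt]))

lemma exists_three (xs : List Int) (h : xs.length = 3) : ∃ x y z : Int, xs = [x, y, z] :=
  match xs, h with
  | [x, y, z], _ => ⟨x, y, z, rfl⟩

lemma inv3_bumpB (d : List (String × List Int)) (c : String) (k : Nat)
    (h3 : Inv3 d) : Inv3 (bumpB d c k) := by
  intro p hp
  unfold bumpB at hp
  have hmem : ∀ q ∈ (if d.any (fun p => p.1 == c) then d else d ++ [(c, [0, 0, 0])]),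
      ∃ x y z : Int, q.2 = [x, y, z] := by
    intro q hq
    by_cases h : d.any (fun p => p.1 == c) = true
    · exact h3 q (by simpa [h] using hq)
    · simp only [h, if_false, Bool.false_eq_true, List.mem_append, List.mem_singleton] at hq
      rcases hq with hq | hq
      · exact h3 q hq
      · exact ⟨0, 0, 0, by simp [hq]⟩
  rcases List.mem_map.1 hp with ⟨q, hq, rfl⟩
  rcases hmem q hq with ⟨x, y, z, hxyz⟩
  by_cases hc : (q.1 == c) = true
  · simp only [hc, if_true]
    apply exists_three
    simp [incAt, hxyz]
  · simp only [hc, if_false]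
    exact ⟨x, y, z, hxyz⟩

-- the value one table row contributes to column j
lemma row_inc (x y z : Int) (k j : Nat) (hk : k < 3) (hj : j < 3) :
    ((PySem.List.pyGet? (incAt [x, y, z] k) (j : Int)).getD 0 : Int) =
      (PySem.List.pyGet? [x, y, z] (j : Int)).getD 0 + (if k = j then 1 else 0) := by
  interval_cases k <;> interval_cases j <;>
    simp [incAt, PySem.List.pyGet?, PySem.List.pyIdx?]

lemma colSum_bumpB (d : List (String × List Int)) (c : String) (k j : Nat)
    (hk : k < 3) (hj : j < 3) (h3 : Inv3 d) (hnd : (d.map Prod.fst).Nodup) :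
    colSum (bumpB d c k) j = colSum d j + (if k = j then 1 else 0) := by
  induction d with
  | nil =>
    rw [bumpB_eq]
    simp only [List.any_nil, Bool.false_eq_true, if_false, List.nil_append]
    interval_cases k <;> interval_cases j <;>
      simp [colSum, incAt, PySem.List.pyGet?, PySem.List.pyIdx?]
  | cons p d ih =>
    simp only [List.map_cons, List.nodup_cons] at hnd
    by_cases hc : (p.1 == c) = true
    · have hno : ∀ q ∈ d, (q.1 == c) = false := by
        intro q hq
        by_contra hqc
        have : q.1 = c := by simpa using hqc
        have : p.1 = c := by simpa using hc
        exact hnd.1 (by rw [‹p.1 = c›, ← ‹q.1 = c›]; exact List.mem_map_of_mem hq)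
      rw [bumpB_cons_self p d c k hc hno]
      rcases h3 p (by simp) with ⟨x, y, z, hxyz⟩
      simp only [colSum, List.map_cons, List.sum_cons]
      rw [hxyz, row_inc x y z k j hk hj]
      ring
    · rw [bumpB_cons_ne p d c k (by simpa using hc)]
      simp only [colSum, List.map_cons, List.sum_cons]
      have := ih (fun q hq => h3 q (by simp [hq])) hnd.2
      simp only [colSum] at this
      rw [this]
      ring

lemma nodup_keys_bumpB (d : List (String × List Int)) (c : String) (k : Nat)
    (hnd : (d.map Prod.fst).Nodup) : ((bumpB d c k).map Prod.fst).Nodup := by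
  rw [keys_bumpB]
  by_cases h : d.any (fun p => p.1 == c) = true
  · rw [if_pos h]; exact hnd
  · rw [if_neg h]
    rw [List.nodup_append]
    refine ⟨hnd, List.nodup_singleton c, ?_⟩
    intro a ha b hb
    have hb' : b = c := by simpa using hb
    subst hb'
    intro hac
    subst hac
    rcases List.mem_map.1 ha with ⟨q, hq, hqc⟩
    exact absurd (List.any_eq_true.2 ⟨q, hq, by simp [hqc]⟩) h

lemma colSum_nil (j : Int) : colSum [] j = 0 := by simp [colSum]

lemma colSum_fold (evs : List (String × Nat)) (d : List (String × List Int)) (j : Nat)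
    (hj : j < 3) (hev : ∀ e ∈ evs, e.2 < 3) (h3 : Inv3 d) (hnd : (d.map Prod.fst).Nodup) :
    colSum (evs.foldl bstep d) j = colSum d j + ((evs.countP (fun e => e.2 == j) : Nat) : Int) := by
  induction evs generalizing d with
  | nil => simp
  | cons e evs ih =>
    have hk : e.2 < 3 := hev e (by simp)
    simp only [List.foldl_cons, bstep]
    rw [ih _ (fun q hq => hev q (by simp [hq])) (inv3_bumpB _ _ _ h3)
        (nodup_keys_bumpB _ _ _ hnd)]
    rw [colSum_bumpB d e.1 e.2 j hk hj h3 hnd, List.countP_cons]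
    by_cases hej : e.2 = j <;> simp [hej] <;> push_cast <;> ring

lemma eventFold_eq (evs : List (String × Nat)) (t f n : Int) (d : List (String × List Int)) :
    evs.foldl applyEv (t, f, n, d) =
      (t + ((evs.countP (fun e => e.2 == 0) : Nat) : Int),
       f + ((evs.countP (fun e => e.2 == 1) : Nat) : Int),
       n + ((evs.countP (fun e => e.2 == 2) : Nat) : Int),
       evs.foldl bstep d) := by
  induction evs generalizing t f n d with
  | nil => simp
  | cons e evs ih =>
    simp only [List.foldl_cons, applyEv, List.countP_cons, bstep]
    rw [ih]
    refine Prod.ext ?_ (Prod.ext ?_ (Prod.ext ?_ rfl))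
    · by_cases h : e.2 = 0 <;> simp [h] <;> push_cast <;> ring
    · by_cases h : e.2 = 1 <;> simp [h] <;> push_cast <;> ring
    · by_cases h : e.2 = 2 <;> simp [h] <;> push_cast <;> ring

lemma events_kinds_lt (hyp ref : List (Int × Int × List String)) :
    ∀ e ∈ (hyp.flatMap (hypEvents ref)) ++ (ref.flatMap (refEvents hyp)), e.2 < 3 := by
  intro e he
  rcases List.mem_append.1 he with h | h
  · rcases List.mem_flatMap.1 h with ⟨a, _, hm⟩
    unfold hypEvents at hm
    split at hm
    · simp at hm
    · split at hm
      · simp at hm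
      · split at hm <;> (rcases List.mem_map.1 hm with ⟨c, _, rfl⟩; omega)
  · rcases List.mem_flatMap.1 h with ⟨a, _, hm⟩
    unfold refEvents at hm
    split at hm
    · simp at hm
    · split at hm
      · rcases List.mem_map.1 hm with ⟨c, _, rfl⟩; omega
      · simp at hm

lemma compareEdits_alt_eq (hyp ref : List (Int × Int × List String)) :
    compareEdits_alt hyp ref =
      (let evs := (hyp.flatMap (hypEvents ref)) ++ (ref.flatMap (refEvents hyp))
       let d := evs.foldl bstep []
       (colSum d 0, colSum d 1, colSum d 2, d)) := by
  unfold compareEdits_alt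
  simp only [PySem.List.foldl_append_eq_flatMap, List.nil_append]
  rfl

theorem compareEdits_eq_alt (hyp ref : List (Int × Int × List String)) :
    compareEdits hyp ref = compareEdits_alt hyp ref := by
  rw [compareEdits_eq_eventFold, compareEdits_alt_eq, eventFold_eq]
  set evs := (hyp.flatMap (hypEvents ref)) ++ (ref.flatMap (refEvents hyp)) with hevs
  have hk := events_kinds_lt hyp ref
  rw [← hevs] at hk
  have c0 := colSum_fold evs [] 0 (by omega) hk (by intro p hp; simp at hp) (by simp)
  have c1 := colSum_fold evs [] 1 (by omega) hk (by intro p hp; simp at hp) (by simp)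
  have c2 := colSum_fold evs [] 2 (by omega) hk (by intro p hp; simp at hp) (by simp)
  simp only [Nat.cast_zero, Nat.cast_one, Nat.cast_ofNat, colSum_nil, zero_add] at c0 c1 c2
  simp [c0, c1, c2]

-- ===== VERDICT (by name: the statement is the Claim_ definition above) =====
theorem compareEdits_spec : Claim_equal_compareEdits := by
  intro hyp ref _ _
  unfold Spec_compareEdits
  exact compareEdits_eq_alt hyp ref
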